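-- pv_equiv track=rewrite | github.com/leliuga/datrin | dataset/dataset.py | text_to_pieces
-- ===== SOURCE A (Python) =====
-- from typing import List
--
-- def text_to_pieces(input: str) -> List[str]:
--     """
--     Splits a given input string into a list of tokens. If a token is a digit, it is split into individual characters.
--
--     Args:
--         input (str): The input string to be split into tokens.
--
--     Returns:
--         List[str]: The list of tokens.
--     """
--
--     pieces = []
--     for piece in input.split(" "):
--         if piece == "":
--             continue
--         if piece.isdigit():
--             for t in list(piece):
--                 pieces.append(t)
--         else:
--             pieces.append(piece)
--
--     return pieces
-- ===== SOURCE B (Python) =====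
-- from typing import List
--
-- def _flush(pieces: List[str], buf: str) -> None:
--     """Append a finished token: digit runs char-by-char, other tokens whole; empty buffers are dropped."""
--     if not buf:
--         return
--     if buf.isdigit():
--         pieces.extend(buf)
--     else:
--         pieces.append(buf)
--
-- def text_to_pieces(input: str) -> List[str]:
--     """Single character scan with a current-token buffer, no intermediate split list."""
--     pieces: List[str] = []
--     buf = ""
--     for ch in input:
--         if ch == " ":
--             _flush(pieces, buf)
--             buf = ""
--         else:
--             buf += ch
--     _flush(pieces, buf)
--     return pieces
-- ===== Notes on version B (the rewrite author's own statement) =====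
-- stated objective: alternative
-- what changed: Replaces split-on-space-then-classify with a single character scan that maintains a current-token buffer, flushed at each space and at end of input, never materialising the split list.
import Mathlib
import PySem

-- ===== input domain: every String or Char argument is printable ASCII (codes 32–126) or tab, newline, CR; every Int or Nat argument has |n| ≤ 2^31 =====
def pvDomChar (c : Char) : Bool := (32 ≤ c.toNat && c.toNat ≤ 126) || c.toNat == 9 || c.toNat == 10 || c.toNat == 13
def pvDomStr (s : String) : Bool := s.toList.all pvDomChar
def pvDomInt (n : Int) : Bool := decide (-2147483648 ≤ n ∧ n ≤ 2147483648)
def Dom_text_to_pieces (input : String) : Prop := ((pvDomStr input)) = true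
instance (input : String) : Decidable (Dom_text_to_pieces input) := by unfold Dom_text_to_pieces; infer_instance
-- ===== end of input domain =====

-- B replaces split(" ")-then-classify with a single buffered character scan (objective: alternative).

-- ===== PORT A =====
def text_to_pieces (input : String) : List String :=
  ((PySem.Chars.splitOn input.toList [' ']).map String.ofList).foldl
    (fun pieces piece =>
      if piece = "" then pieces
      else if PySem.Str.strIsdigit piece then
        piece.toList.foldl (fun ps t => ps ++ [String.ofList [t]]) pieces
      else pieces ++ [piece]) []

-- ===== PORT B =====
-- _flush(pieces, buf): drop empty buffers, expand digit runs, else append whole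
def tpFlush (pieces : List String) (buf : String) : List String :=
  if buf = "" then pieces
  else if PySem.Str.strIsdigit buf then pieces ++ buf.toList.map (fun c => String.ofList [c])
  else pieces ++ [buf]

-- the character scan with its buffer
def tpScan : List Char → List String → String → List String
  | [], pieces, buf => tpFlush pieces buf
  | c :: rest, pieces, buf =>
      if c = ' ' then tpScan rest (tpFlush pieces buf) ""
      else tpScan rest pieces (buf.push c)

def text_to_pieces_alt (input : String) : List String :=
  tpScan input.toList [] ""

-- ===== PRECONDITION & SPEC =====
def Spec_text_to_pieces (input : String) (out : List String) : Prop := out = text_to_pieces_alt input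
instance (input : String) (out : List String) : Decidable (Spec_text_to_pieces input out) := by unfold Spec_text_to_pieces; infer_instance

-- ===== CLAIM (what is proved, stated in full; the proofs are below) =====
def Claim_equal_text_to_pieces : Prop := ∀ (input : String), Dom_text_to_pieces input → Spec_text_to_pieces input (text_to_pieces input)

-- ===== LEMMAS AND PROOFS =====

-- A's loop body, named for the proofs
def stepA (p : List String) (piece : String) : List String :=
  if piece = "" then p
  else if PySem.Str.strIsdigit piece then
    piece.toList.foldl (fun ps t => ps ++ [String.ofList [t]]) p
  else p ++ [piece]

theorem portA_eq (input : String) :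
    text_to_pieces input = ((PySem.Chars.splitOn input.toList [' ']).map String.ofList).foldl stepA [] := rfl

-- clean recursive model of splitting on a single space
def splitSp : List Char → List Char → List (List Char)
  | [], cur => [cur.reverse]
  | c :: rest, cur => if c = ' ' then cur.reverse :: splitSp rest [] else splitSp rest (c :: cur)

theorem splitOn_go_eq (fuel : Nat) (l cur : List Char) (acc : List (List Char)) (h : l.length < fuel) :
    PySem.Chars.splitOn.go [' '] fuel l cur acc = acc.reverse ++ splitSp l cur := by
  induction fuel generalizing l cur acc with
  | zero => omega
  | succ fuel ih =>
    cases l with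
    | nil => simp [PySem.Chars.splitOn.go, splitSp]
    | cons c rest =>
      by_cases hc : c = ' '
      · subst hc
        rw [show PySem.Chars.splitOn.go [' '] (fuel+1) (' ' :: rest) cur acc
              = PySem.Chars.splitOn.go [' '] fuel rest [] (cur.reverse :: acc) by
            simp [PySem.Chars.splitOn.go, List.isPrefixOf]]
        rw [ih rest [] (cur.reverse :: acc) (by simpa using Nat.lt_of_succ_lt_succ h)]
        simp [splitSp]
      · rw [show PySem.Chars.splitOn.go [' '] (fuel+1) (c :: rest) cur acc
              = PySem.Chars.splitOn.go [' '] fuel rest (c :: cur) acc by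
            simp [PySem.Chars.splitOn.go, List.isPrefixOf, Ne.symm hc]]
        rw [ih rest (c :: cur) acc (by simpa using Nat.lt_of_succ_lt_succ h)]
        simp [splitSp, hc]

theorem splitOn_eq_splitSp (s : List Char) :
    PySem.Chars.splitOn s [' '] = splitSp s [] := by
  simpa [PySem.Chars.splitOn] using splitOn_go_eq (s.length + 1) s [] [] (by omega)

theorem foldl_append_singleton (l : List Char) (p : List String) :
    l.foldl (fun ps t => ps ++ [String.ofList [t]]) p = p ++ l.map (fun c => String.ofList [c]) := by
  induction l generalizing p with
  | nil => simp
  | cons c rest ih => rw [List.foldl_cons, ih]; simp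

theorem stepA_eq_flush (p : List String) (s : String) :
    stepA p s = tpFlush p s := by
  unfold stepA tpFlush
  split_ifs
  · rfl
  · exact foldl_append_singleton _ _
  · rfl

theorem mk_push (cur : List Char) (c : Char) :
    (String.ofList cur).push c = String.ofList (cur ++ [c]) := by
  apply String.toList_injective
  simp

theorem main_scan (l : List Char) : ∀ (cur : List Char) (pieces : List String),
    ((splitSp l cur).map String.ofList).foldl stepA pieces = tpScan l pieces (String.ofList cur.reverse) := by
  induction l with
  | nil =>
    intro cur pieces
    simpa [splitSp, tpScan] using stepA_eq_flush pieces (String.ofList cur.reverse)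
  | cons c rest ih =>
    intro cur pieces
    by_cases hc : c = ' '
    · subst hc
      rw [splitSp, if_pos rfl, List.map_cons, List.foldl_cons, stepA_eq_flush]
      show _ = tpScan (' ' :: rest) pieces (String.ofList cur.reverse)
      rw [tpScan, if_pos rfl]
      simpa using ih [] (tpFlush pieces (String.ofList cur.reverse))
    · rw [splitSp, if_neg hc]
      show _ = tpScan (c :: rest) pieces (String.ofList cur.reverse)
      rw [tpScan, if_neg hc, mk_push, ih (c :: cur) pieces]
      simp

-- ===== VERDICT (by name: the statement is the Claim_ definition above) =====
theorem text_to_pieces_spec : Claim_equal_text_to_pieces := by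
  intro input _
  unfold Spec_text_to_pieces text_to_pieces_alt
  rw [portA_eq, splitOn_eq_splitSp]
  simpa using main_scan input.toList [] []
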